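-- pv_equiv track=rewrite | github.com/x0to1log/0to1log | backend/services/pipeline_quality.py | _apply_issue_penalties_and_caps
-- ===== SOURCE A (Python) =====
-- def _apply_issue_penalties_and_caps(
--     base_score: int,
--     issues: list[dict[str, str]],
-- ) -> tuple[int, int, list[str]]:
--     """Apply deterministic issue penalties and score caps."""
--     penalty = 0
--     caps: list[tuple[int, str]] = []
--     for issue in issues:
--         severity = issue.get("severity", "minor")
--         scope = issue.get("scope", "")
--         category = issue.get("category", "")
--         if severity == "major":
--             penalty += 5
--             if category in {"source", "factuality", "fabrication"}:
--                 caps.append((84, "major_source_cap_84"))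
--             if scope == "frontload" and category in {"overclaim", "calibration", "clarity"}:
--                 # Below auto_publish_threshold (85) so the cap actually blocks
--                 # auto-publish rather than just nominally flagging the issue.
--                 caps.append((84, "frontload_overclaim_cap_84"))
--             if category == "locale" or scope == "ko":
--                 # Below auto_publish_threshold (85). Locale leakage (e.g.,
--                 # English in KO body, Apr 19 Community Pulse incident) is a
--                 # hard failure for reader trust — should never auto-publish.
--                 caps.append((84, "locale_quality_cap_84"))
--             if scope == "learner_body" and category == "accessibility":
--                 caps.append((92, "learner_accessibility_cap_92"))
--         else:
--             penalty += 2
--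
--     penalty = min(penalty, 20)
--     penalized_score = max(0, base_score - penalty)
--     if not caps:
--         return penalized_score, penalty, []
--     cap_score, _label = min(caps, key=lambda item: item[0])
--     final_score = min(penalized_score, cap_score)
--     # Dedup labels and return strictest cap first (smallest cap value).
--     ordered_unique = sorted(set(caps), key=lambda item: (item[0], item[1]))
--     return final_score, penalty, [label for _, label in ordered_unique]
-- ===== SOURCE B (Python) =====
-- # Rule table (kept in (cap value, label) sorted order) + per-rule hit flags
-- # instead of accumulating duplicate cap tuples and dedup/sort at the end.
-- _CAP_RULES = [
--     ("frontload_overclaim_cap_84", 84,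
--      lambda scope, cat: scope == "frontload" and cat in ("overclaim", "calibration", "clarity")),
--     ("locale_quality_cap_84", 84,
--      lambda scope, cat: cat == "locale" or scope == "ko"),
--     ("major_source_cap_84", 84,
--      lambda scope, cat: cat in ("source", "factuality", "fabrication")),
--     ("learner_accessibility_cap_92", 92,
--      lambda scope, cat: scope == "learner_body" and cat == "accessibility"),
-- ]
--
--
-- def _apply_issue_penalties_and_caps(base_score, issues):
--     penalty = 0
--     hits = [False] * len(_CAP_RULES)
--     for issue in issues:
--         if issue.get("severity", "minor") != "major":
--             penalty += 2
--             continue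
--         penalty += 5
--         scope = issue.get("scope", "")
--         cat = issue.get("category", "")
--         hits = [h or pred(scope, cat) for h, (_, _, pred) in zip(hits, _CAP_RULES)]
--     penalty = min(penalty, 20)
--     penalized = max(0, base_score - penalty)
--     sel = [(lbl, val) for h, (lbl, val, _) in zip(hits, _CAP_RULES) if h]
--     if not sel:
--         return penalized, penalty, []
--     cap_score = min(val for _, val in sel)
--     return min(penalized, cap_score), penalty, [lbl for lbl, _ in sel]
-- ===== Notes on version B (the rewrite author's own statement) =====
-- stated objective: simpler
-- what changed: B replaces A's accumulation of duplicate (value,label) cap tuples followed by min/set-dedup/sort with a module-level rule table kept in (value,label) order and one boolean hit flag per rule, so the final labels and minimum cap fall out of a single filter over the table.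
import Mathlib
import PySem

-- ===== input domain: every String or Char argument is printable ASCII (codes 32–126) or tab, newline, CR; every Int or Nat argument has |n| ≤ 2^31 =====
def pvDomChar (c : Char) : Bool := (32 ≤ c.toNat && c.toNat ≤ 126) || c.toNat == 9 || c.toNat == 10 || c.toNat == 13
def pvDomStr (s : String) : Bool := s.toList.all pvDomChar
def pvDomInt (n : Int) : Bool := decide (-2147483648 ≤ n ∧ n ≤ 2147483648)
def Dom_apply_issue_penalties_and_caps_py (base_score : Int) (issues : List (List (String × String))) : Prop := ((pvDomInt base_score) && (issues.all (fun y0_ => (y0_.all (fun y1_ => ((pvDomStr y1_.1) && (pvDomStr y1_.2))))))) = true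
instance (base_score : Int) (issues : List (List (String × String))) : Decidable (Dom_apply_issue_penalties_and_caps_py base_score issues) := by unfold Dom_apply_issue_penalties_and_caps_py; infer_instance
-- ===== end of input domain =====

-- B replaces the accumulated duplicate cap tuples + final dedup/sort by a fixed rule table
-- (kept in (value, label) order) with one hit flag per rule; simpler, same results.

-- ===== PORT A =====
def stepA (st : Int × List (Int × String)) (issue : List (String × String)) : Int × List (Int × String) :=
  let severity := PySem.Dict.getD (PySem.Dict.mk issue) "severity" "minor"
  let scope := PySem.Dict.getD (PySem.Dict.mk issue) "scope" ""
  let category := PySem.Dict.getD (PySem.Dict.mk issue) "category" ""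
  if severity == "major" then
    let caps := st.2
    let caps := if category == "source" || category == "factuality" || category == "fabrication" then caps ++ [((84 : Int), "major_source_cap_84")] else caps
    let caps := if scope == "frontload" && (category == "overclaim" || category == "calibration" || category == "clarity") then caps ++ [((84 : Int), "frontload_overclaim_cap_84")] else caps
    let caps := if category == "locale" || scope == "ko" then caps ++ [((84 : Int), "locale_quality_cap_84")] else caps
    let caps := if scope == "learner_body" && category == "accessibility" then caps ++ [((92 : Int), "learner_accessibility_cap_92")] else caps
    (st.1 + 5, caps)
  else (st.1 + 2, st.2)

def tailA (base_score : Int) (st : Int × List (Int × String)) : Int × Int × List String :=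
  let penalty := min st.1 20
  let penalized_score := max 0 (base_score - penalty)
  match PySem.List.min? st.2 (fun item => item.1) with
  | none => (penalized_score, penalty, [])
  | some m =>
    let final_score := min penalized_score m.1
    let ordered_unique := PySem.List.sorted2 (PySem.Set.ofList st.2) (fun item => item.1) (fun item => item.2)
    (final_score, penalty, ordered_unique.map (fun item => item.2))

def apply_issue_penalties_and_caps_py (base_score : Int) (issues : List (List (String × String))) : Int × Int × List String :=
  tailA base_score (issues.foldl stepA (0, []))

-- ===== PORT B =====
-- B-side helper: the module-level rule table _CAP_RULES of Source B
def pvCapRules : List (String × Int × (String → String → Bool)) :=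
  [("frontload_overclaim_cap_84", 84, fun scope cat => scope == "frontload" && (cat == "overclaim" || cat == "calibration" || cat == "clarity")),
   ("locale_quality_cap_84", 84, fun scope cat => cat == "locale" || scope == "ko"),
   ("major_source_cap_84", 84, fun scope cat => cat == "source" || cat == "factuality" || cat == "fabrication"),
   ("learner_accessibility_cap_92", 92, fun scope cat => scope == "learner_body" && cat == "accessibility")]

def stepB (st : Int × List Bool) (issue : List (String × String)) : Int × List Bool :=
  if PySem.Dict.getD (PySem.Dict.mk issue) "severity" "minor" != "major" then (st.1 + 2, st.2)
  else
    let scope := PySem.Dict.getD (PySem.Dict.mk issue) "scope" ""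
    let cat := PySem.Dict.getD (PySem.Dict.mk issue) "category" ""
    (st.1 + 5, (st.2.zip pvCapRules).map (fun p => p.1 || p.2.2.2 scope cat))

def tailB (base_score : Int) (st : Int × List Bool) : Int × Int × List String :=
  let penalty := min st.1 20
  let penalized := max 0 (base_score - penalty)
  let sel := (st.2.zip pvCapRules).filterMap (fun p => if p.1 then some (p.2.1, p.2.2.1) else none)
  match sel with
  | [] => (penalized, penalty, [])
  | s :: t => (min penalized (t.foldl (fun m q => min m q.2) s.2), penalty, (s :: t).map (fun q => q.1))

def apply_issue_penalties_and_caps_py_alt (base_score : Int) (issues : List (List (String × String))) : Int × Int × List String :=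
  tailB base_score (issues.foldl stepB (0, List.replicate pvCapRules.length false))

-- ===== PRECONDITION & SPEC =====
def Spec_apply_issue_penalties_and_caps_py (base_score : Int) (issues : List (List (String × String))) (out : Int × Int × List String) : Prop := out = apply_issue_penalties_and_caps_py_alt base_score issues
instance (base_score : Int) (issues : List (List (String × String))) (out : Int × Int × List String) : Decidable (Spec_apply_issue_penalties_and_caps_py base_score issues out) := by unfold Spec_apply_issue_penalties_and_caps_py; infer_instance

-- ===== CLAIM (what is proved, stated in full; the proofs are below) =====
def Claim_equal_apply_issue_penalties_and_caps_py : Prop := ∀ (base_score : Int) (issues : List (List (String × String))), Dom_apply_issue_penalties_and_caps_py base_score issues → Spec_apply_issue_penalties_and_caps_py base_score issues (apply_issue_penalties_and_caps_py base_score issues)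

-- ===== LEMMAS AND PROOFS =====

-- The four possible cap tuples
def pvFO : Int × String := (84, "frontload_overclaim_cap_84")
def pvLO : Int × String := (84, "locale_quality_cap_84")
def pvMS : Int × String := (84, "major_source_cap_84")
def pvLA : Int × String := (92, "learner_accessibility_cap_92")

-- Relation between A's accumulated cap list and B's four hit flags
def CapsRel (caps : List (Int × String)) (h0 h1 h2 h3 : Bool) : Prop :=
  (pvFO ∈ caps ↔ h0 = true) ∧ (pvLO ∈ caps ↔ h1 = true) ∧
  (pvMS ∈ caps ↔ h2 = true) ∧ (pvLA ∈ caps ↔ h3 = true) ∧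
  ∀ c ∈ caps, c = pvFO ∨ c = pvLO ∨ c = pvMS ∨ c = pvLA

lemma mem_ite_append {α : Type} (x y : α) (l : List α) (c : Bool) :
    (x ∈ (if c = true then l ++ [y] else l)) ↔ (x ∈ l ∨ (c = true ∧ x = y)) := by
  cases c <;> simp

lemma capsRel_step (caps : List (Int × String)) (h0 h1 h2 h3 c0 c1 c2 c3 : Bool)
    (h : CapsRel caps h0 h1 h2 h3) :
    CapsRel
      (if c3 = true then
        (if c1 = true then
          (if c0 = true then (if c2 = true then caps ++ [pvMS] else caps) ++ [pvFO]
           else (if c2 = true then caps ++ [pvMS] else caps)) ++ [pvLO]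
         else
          (if c0 = true then (if c2 = true then caps ++ [pvMS] else caps) ++ [pvFO]
           else (if c2 = true then caps ++ [pvMS] else caps))) ++ [pvLA]
       else
        (if c1 = true then
          (if c0 = true then (if c2 = true then caps ++ [pvMS] else caps) ++ [pvFO]
           else (if c2 = true then caps ++ [pvMS] else caps)) ++ [pvLO]
         else
          (if c0 = true then (if c2 = true then caps ++ [pvMS] else caps) ++ [pvFO]
           else (if c2 = true then caps ++ [pvMS] else caps))))
      (h0 || c0) (h1 || c1) (h2 || c2) (h3 || c3) := by
  obtain ⟨m0, m1, m2, m3, hsub⟩ := h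
  refine ⟨?_, ?_, ?_, ?_, ?_⟩
  · simp only [mem_ite_append, pvFO, pvLO, pvMS, pvLA, Prod.mk.injEq]
    simp only [pvFO, pvLO, pvMS, pvLA] at m0
    rw [m0]; cases h0 <;> cases c0 <;> cases c1 <;> cases c2 <;> cases c3 <;> simp
  · simp only [mem_ite_append, pvFO, pvLO, pvMS, pvLA, Prod.mk.injEq]
    simp only [pvFO, pvLO, pvMS, pvLA] at m1
    rw [m1]; cases h1 <;> cases c0 <;> cases c1 <;> cases c2 <;> cases c3 <;> simp
  · simp only [mem_ite_append, pvFO, pvLO, pvMS, pvLA, Prod.mk.injEq]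
    simp only [pvFO, pvLO, pvMS, pvLA] at m2
    rw [m2]; cases h2 <;> cases c0 <;> cases c1 <;> cases c2 <;> cases c3 <;> simp
  · simp only [mem_ite_append, pvFO, pvLO, pvMS, pvLA, Prod.mk.injEq]
    simp only [pvFO, pvLO, pvMS, pvLA] at m3
    rw [m3]; cases h3 <;> cases c0 <;> cases c1 <;> cases c2 <;> cases c3 <;> simp
  · intro c hc
    rw [mem_ite_append] at hc
    rcases hc with hc | ⟨_, rfl⟩
    rw [mem_ite_append] at hc
    rcases hc with hc | ⟨_, rfl⟩
    rw [mem_ite_append] at hc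
    rcases hc with hc | ⟨_, rfl⟩
    rw [mem_ite_append] at hc
    rcases hc with hc | ⟨_, rfl⟩
    · exact hsub c hc
    · tauto
    · tauto
    · tauto
    · tauto

lemma stepA_stepB (st : Int × List (Int × String)) (p : Int) (h0 h1 h2 h3 : Bool)
    (issue : List (String × String)) (hp : st.1 = p) (hc : CapsRel st.2 h0 h1 h2 h3) :
    (stepA st issue).1 = (stepB (p, [h0, h1, h2, h3]) issue).1 ∧
    ∃ h0' h1' h2' h3', (stepB (p, [h0, h1, h2, h3]) issue).2 = [h0', h1', h2', h3'] ∧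
      CapsRel (stepA st issue).2 h0' h1' h2' h3' := by
  unfold stepA stepB
  set sc := PySem.Dict.getD (PySem.Dict.mk issue) "scope" "" with hscdef
  set ca := PySem.Dict.getD (PySem.Dict.mk issue) "category" "" with hcadef
  by_cases hsev : (PySem.Dict.getD (PySem.Dict.mk issue) "severity" "minor" == "major") = true
  · simp only [bne, hsev, Bool.not_true, Bool.false_eq_true, if_false, if_true]
    refine ⟨by simp [hp],
      h0 || (sc == "frontload" && (ca == "overclaim" || ca == "calibration" || ca == "clarity")),
      h1 || (ca == "locale" || sc == "ko"),
      h2 || (ca == "source" || ca == "factuality" || ca == "fabrication"),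
      h3 || (sc == "learner_body" && ca == "accessibility"),
      by simp [pvCapRules], ?_⟩
    exact capsRel_step st.2 h0 h1 h2 h3 _ _ _ _ hc
  · rw [Bool.not_eq_true] at hsev
    simp only [bne, hsev, Bool.not_false, if_true, Bool.false_eq_true, if_false]
    exact ⟨by simp [hp], h0, h1, h2, h3, rfl, hc⟩

lemma fold_inv (issues : List (List (String × String))) :
    ∀ (st : Int × List (Int × String)) (p : Int) (h0 h1 h2 h3 : Bool), st.1 = p →
    CapsRel st.2 h0 h1 h2 h3 →
    (issues.foldl stepA st).1 = (issues.foldl stepB (p, [h0, h1, h2, h3])).1 ∧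
    ∃ h0' h1' h2' h3', (issues.foldl stepB (p, [h0, h1, h2, h3])).2 = [h0', h1', h2', h3'] ∧
      CapsRel (issues.foldl stepA st).2 h0' h1' h2' h3' := by
  induction issues with
  | nil => intro st p h0 h1 h2 h3 hp hc; exact ⟨hp, h0, h1, h2, h3, rfl, hc⟩
  | cons issue rest ih =>
    intro st p h0 h1 h2 h3 hp hc
    obtain ⟨hp', h0', h1', h2', h3', hb, hc'⟩ := stepA_stepB st p h0 h1 h2 h3 issue hp hc
    simp only [List.foldl_cons]
    have : stepB (p, [h0, h1, h2, h3]) issue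
        = ((stepB (p, [h0, h1, h2, h3]) issue).1, [h0', h1', h2', h3']) := by
      rw [← hb]
    rw [this, ← hp']
    exact ih (stepA st issue) _ h0' h1' h2' h3' rfl hc'

-- sorted2 with keys fst/snd is sorted with the lexicographic key (the comparison booleans agree)
lemma sorted2_eq_sorted_lex (xs : List (Int × String)) :
    PySem.List.sorted2 xs (fun i => i.1) (fun i => i.2)
      = PySem.List.sorted xs (fun i => toLex (i.1, i.2)) := by
  rw [PySem.List.sorted_eq_foldl_insertBy]
  show List.foldl (fun acc x => PySem.List.insertBy _ x acc) [] xs = _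
  have hpred : (fun (a b : Int × String) => decide (a.1 < b.1) || (!decide (b.1 < a.1) && decide (a.2 < b.2)))
      = (fun a b => decide (toLex (a.1, a.2) < toLex (b.1, b.2))) := by
    funext a b
    rcases lt_trichotomy a.1 b.1 with h | h | h
    · simp [h, not_lt_of_gt h, Prod.Lex.lt_iff]
    · simp [h, lt_irrefl, Prod.Lex.lt_iff]
    · simp [not_lt_of_gt h, Prod.Lex.lt_iff, ne_of_gt h, le_of_lt]
      intro hlt; omega
  rw [hpred]
  simp

lemma sorted2_eq_of_perm (xs ys : List (Int × String)) (hperm : ys.Perm xs)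
    (hpw : ys.Pairwise (fun a b => toLex (a.1, a.2) < toLex (b.1, b.2))) :
    PySem.List.sorted2 xs (fun i => i.1) (fun i => i.2) = ys := by
  rw [sorted2_eq_sorted_lex]
  exact PySem.List.sorted_eq_of_perm_of_pairwise_lt xs ys _ hperm hpw

lemma pairwise_four : List.Pairwise (fun a b : Int × String => toLex (a.1, a.2) < toLex (b.1, b.2))
    [pvFO, pvLO, pvMS, pvLA] := by
  have hlt : ∀ x y : Int × String, (x.1 < y.1 ∨ (x.1 = y.1 ∧ x.2.toList < y.2.toList)) →
      toLex (x.1, x.2) < toLex (y.1, y.2) := by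
    intro x y h
    refine Prod.Lex.lt_iff.mpr ?_
    rcases h with h | ⟨h1, h2⟩
    · exact Or.inl h
    · exact Or.inr ⟨h1, String.lt_iff_toList_lt.mpr h2⟩
  refine List.Pairwise.cons ?_ (List.Pairwise.cons ?_ (List.Pairwise.cons ?_ (List.Pairwise.cons ?_ List.Pairwise.nil))) <;>
    intro b hb <;> fin_cases hb <;> exact hlt _ _ (by decide)

lemma caps_empty_of_rel (caps : List (Int × String)) (h : CapsRel caps false false false false) :
    caps = [] := by
  obtain ⟨m0, m1, m2, m3, hsub⟩ := h
  rcases caps with _ | ⟨c, t⟩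
  · rfl
  · exfalso
    rcases hsub c List.mem_cons_self with h | h | h | h <;> subst h
    · exact absurd (m0.mp List.mem_cons_self) (by simp)
    · exact absurd (m1.mp List.mem_cons_self) (by simp)
    · exact absurd (m2.mp List.mem_cons_self) (by simp)
    · exact absurd (m3.mp List.mem_cons_self) (by simp)

lemma min?_fst_of_rel (caps : List (Int × String)) (h0 h1 h2 h3 : Bool)
    (h : CapsRel caps h0 h1 h2 h3) (m : Int × String)
    (hm : PySem.List.min? caps (fun item => item.1) = some m) :
    m.1 = if h0 || h1 || h2 then 84 else 92 := by
  obtain ⟨m0, m1, m2, m3, hsub⟩ := h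
  have hmem : m ∈ caps := PySem.List.min?_mem hm
  have hmin : ∀ y ∈ caps, m.1 ≤ y.1 := PySem.List.min?_isMin hm
  by_cases hany : (h0 || h1 || h2) = true
  · simp only [hany, if_true]
    have h84 : ∃ y ∈ caps, y.1 = (84 : Int) := by
      rcases Bool.or_eq_true _ _ |>.mp hany with h | h
      · rcases Bool.or_eq_true _ _ |>.mp h with h | h
        · exact ⟨pvFO, m0.mpr h, rfl⟩
        · exact ⟨pvLO, m1.mpr h, rfl⟩
      · exact ⟨pvMS, m2.mpr h, rfl⟩
    obtain ⟨y, hy, hy1⟩ := h84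
    have hle := hmin y hy
    have hrange : m.1 = 84 ∨ m.1 = 92 := by
      rcases hsub m hmem with h | h | h | h <;> simp [h, pvFO, pvLO, pvMS, pvLA]
    omega
  · rw [Bool.not_eq_true] at hany
    simp only [hany, Bool.false_eq_true, if_false]
    have hh0 : h0 = false := by revert hany; cases h0 <;> simp
    have hh1 : h1 = false := by revert hany; cases h1 <;> simp
    have hh2 : h2 = false := by revert hany; cases h2 <;> simp
    subst hh0 hh1 hh2
    rcases hsub m hmem with h | h | h | h
    · exact absurd (m0.mp (h ▸ hmem)) (by simp)
    · exact absurd (m1.mp (h ▸ hmem)) (by simp)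
    · exact absurd (m2.mp (h ▸ hmem)) (by simp)
    · simp [h, pvLA]

lemma ofList_perm_filter (caps : List (Int × String)) (h0 h1 h2 h3 : Bool)
    (h : CapsRel caps h0 h1 h2 h3) :
    (([pvFO, pvLO, pvMS, pvLA].filter (fun c =>
      (c == pvFO && h0) || (c == pvLO && h1) || (c == pvMS && h2) || (c == pvLA && h3)))).Perm
      (PySem.Set.ofList caps) := by
  obtain ⟨m0, m1, m2, m3, hsub⟩ := h
  apply (List.perm_ext_iff_of_nodup ?_ (PySem.Set.nodup_ofList caps)).mpr
  · intro c
    simp only [PySem.Set.mem_ofList, List.mem_filter]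
    constructor
    · rintro ⟨hc, hcond⟩
      fin_cases hc <;> simp_all [pvFO, pvLO, pvMS, pvLA]
    · intro hc
      rcases hsub c hc with h | h | h | h <;> subst h <;>
        simp_all [pvFO, pvLO, pvMS, pvLA]
  · apply List.Nodup.filter
    simp [pvFO, pvLO, pvMS, pvLA]

set_option maxHeartbeats 1000000 in
lemma tail_eq (base_score p : Int) (caps : List (Int × String)) (h0 h1 h2 h3 : Bool)
    (h : CapsRel caps h0 h1 h2 h3) :
    tailA base_score (p, caps) = tailB base_score (p, [h0, h1, h2, h3]) := by
  have hperm := ofList_perm_filter caps h0 h1 h2 h3 h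
  have hsorted := sorted2_eq_of_perm (PySem.Set.ofList caps) _ hperm
    (pairwise_four.sublist List.filter_sublist)
  cases hall : (h0 || h1 || h2 || h3)
  · have hh0 : h0 = false := by revert hall; cases h0 <;> simp
    have hh1 : h1 = false := by revert hall; cases h1 <;> simp
    have hh2 : h2 = false := by revert hall; cases h2 <;> simp
    have hh3 : h3 = false := by revert hall; cases h3 <;> simp
    subst hh0 hh1 hh2 hh3
    have hnil := caps_empty_of_rel caps h
    subst hnil
    simp [tailA, tailB, pvCapRules, PySem.List.min?]
  · rcases hmin : PySem.List.min? caps (fun item => item.1) with _ | m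
    · exfalso
      have hnil : caps = [] := (PySem.List.min?_eq_none_iff _ _).mp hmin
      subst hnil
      obtain ⟨m0, m1, m2, m3, _⟩ := h
      revert hall
      cases h0 <;> cases h1 <;> cases h2 <;> cases h3 <;> simp_all
    · have hm1 := min?_fst_of_rel caps h0 h1 h2 h3 h m hmin
      unfold tailA tailB
      rw [hmin, hsorted]
      clear hperm hsorted
      cases h0 <;> cases h1 <;> cases h2 <;> cases h3 <;>
        simp_all [pvCapRules, pvFO, pvLO, pvMS, pvLA]

-- ===== VERDICT (by name: the statement is the Claim_ definition above) =====
theorem apply_issue_penalties_and_caps_py_spec : Claim_equal_apply_issue_penalties_and_caps_py := by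
  intro base_score issues _
  unfold Spec_apply_issue_penalties_and_caps_py
  show tailA base_score (issues.foldl stepA (0, [])) = tailB base_score (issues.foldl stepB (0, List.replicate pvCapRules.length false))
  have hrep : List.replicate pvCapRules.length false = [false, false, false, false] := rfl
  rw [hrep]
  obtain ⟨hp, h0, h1, h2, h3, hb, hc⟩ :=
    fold_inv issues (0, []) 0 false false false false rfl (by simp [CapsRel, pvFO, pvLO, pvMS, pvLA])
  have hA : issues.foldl stepA (0, []) = ((issues.foldl stepA (0, [])).1, (issues.foldl stepA (0, [])).2) := rfl
  have hB : issues.foldl stepB (0, [false, false, false, false])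
      = ((issues.foldl stepA (0, [])).1, [h0, h1, h2, h3]) := by
    rw [hp]; exact Prod.ext rfl hb
  rw [hA, hB]
  exact tail_eq base_score _ _ h0 h1 h2 h3 hc
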